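-- pv_equiv track=rewrite | github.com/yenru0/CodeObjecct | storage/zeta/py/completed/1043.py | solve
-- ===== SOURCE A (Python) =====
-- def solve(N, M, know: set[int], parties):
--     valid_party = [1 for _ in parties]
--
--     flag = True
--
--     while flag:
--         flag = False
--         for i, p in enumerate(parties):
--             cond = [m in know for m in p]
--             if all(cond):
--                 valid_party[i] = 0
--             elif any(cond):
--                 flag = True
--                 valid_party[i] = 0
--                 for m in p:
--                     know.add(m)
--
--     return sum(valid_party)
-- ===== SOURCE B (Python) =====
-- def solve(N, M, know: set[int], parties):
--     # BFS from the initial knowers over the "shares a party" relation: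
--     # a party is spoiled iff it contains a member reachable from `know`.
--     # (Unlike A, B does not mutate `know`; the equivalence is about the return value.)
--     adj = {}
--     for i, p in enumerate(parties):
--         for m in p:
--             adj.setdefault(m, []).append(i)
--     seen = set(know)
--     stack = list(know)
--     done = [False] * len(parties)
--     while stack:
--         m = stack.pop()
--         for i in adj.get(m, []):
--             if not done[i]:
--                 done[i] = True
--                 for x in parties[i]:
--                     if x not in seen:
--                         seen.add(x)
--                         stack.append(x)
--     return sum(1 for p in parties if p and all(x not in seen for x in p))
-- ===== Notes on version B (the rewrite author's own statement) =====
-- stated objective: alternative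
-- what changed: A repeatedly re-sweeps all parties against a growing known-set until a pass changes nothing; B builds a member-to-party-indices dictionary once and does a single BFS from the initial knowers, marking each party done when first reached, then counts the nonempty parties disjoint from the reached set.
import Mathlib
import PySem

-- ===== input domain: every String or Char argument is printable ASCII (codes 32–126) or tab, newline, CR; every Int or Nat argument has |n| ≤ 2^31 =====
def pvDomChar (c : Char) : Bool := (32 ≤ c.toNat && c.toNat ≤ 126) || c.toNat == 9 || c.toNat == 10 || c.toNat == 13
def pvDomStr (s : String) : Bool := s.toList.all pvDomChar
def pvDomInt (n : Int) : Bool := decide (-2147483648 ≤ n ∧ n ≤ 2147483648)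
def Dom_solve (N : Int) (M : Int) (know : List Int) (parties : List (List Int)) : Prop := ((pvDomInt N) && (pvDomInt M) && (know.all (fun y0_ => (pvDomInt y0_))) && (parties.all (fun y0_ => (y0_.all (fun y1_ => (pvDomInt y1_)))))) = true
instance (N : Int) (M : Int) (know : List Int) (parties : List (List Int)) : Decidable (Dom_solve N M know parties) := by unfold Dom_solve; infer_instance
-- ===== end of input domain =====

-- B replaces A's repeated full sweeps over the parties with a single BFS from the
-- initial knowers over a member→parties index (return value only: A mutates `know`, B does not).


-- ===== PORT A =====
-- one body of the `for i, p in enumerate(parties)` loop (state: know, valid_party, flag)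
def passStep (st : PySem.Set Int × List Int × Bool) (ip : Int × List Int) :
    PySem.Set Int × List Int × Bool :=
  let cond := ip.2.map (fun m => PySem.Set.contains st.1 m)
  if cond.all (fun b => b) then (st.1, PySem.List.pySetD st.2.1 ip.1 0, st.2.2)
  else if cond.any (fun b => b) then
    (ip.2.foldl PySem.Set.add st.1, PySem.List.pySetD st.2.1 ip.1 0, true)
  else st

-- one iteration of the `while flag` body (flag reset to False, then the for loop)
def solveApass (parties : List (List Int)) (know : PySem.Set Int) (valid : List Int) :
    PySem.Set Int × List Int × Bool :=
  (PySem.List.enumerate parties 0).foldl passStep (know, valid, false)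

-- the `while flag` loop; the fuel is a termination guard only (each flagged pass
-- adds a fresh member to `know`, so `flatten.length + 2` passes always suffice)
def solveAloop (parties : List (List Int)) : Nat → PySem.Set Int → List Int → List Int
  | 0, _, valid => valid
  | fuel+1, know, valid =>
    let st := solveApass parties know valid
    if st.2.2 then solveAloop parties fuel st.1 st.2.1 else st.2.1

def solve (N : Int) (M : Int) (know : List Int) (parties : List (List Int)) : Int :=
  (solveAloop parties (parties.flatten.length + 2) (PySem.Set.ofList know)
    (parties.map (fun _ => (1 : Int)))).sum

-- ===== PORT B =====
-- adj.setdefault(m, []).append(i) for every i, p in enumerate(parties), m in p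
def buildAdj (parties : List (List Int)) : PySem.Dict Int (List Int) :=
  (PySem.List.enumerate parties 0).foldl
    (fun d ip => ip.2.foldl (fun d2 m => d2.modify m [] (fun l => l ++ [ip.1])) d)
    PySem.Dict.empty

-- `if not done[i]: done[i] = True; for x in parties[i]: if x not in seen: seen.add(x); stack.append(x)`
def bfsInner (parties : List (List Int)) (st : PySem.Set Int × List Int × List Bool) (i : Int) :
    PySem.Set Int × List Int × List Bool :=
  if PySem.List.pyGetD st.2.2 i false then st
  else
    let inner := (PySem.List.pyGetD parties i []).foldl
      (fun st2 x => if PySem.Set.contains st2.1 x then st2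
                    else (PySem.Set.add st2.1 x, x :: st2.2)) (st.1, st.2.1)
    (inner.1, inner.2, PySem.List.pySetD st.2.2 i true)

def solveBloop (parties : List (List Int)) (adj : PySem.Dict Int (List Int)) :
    Nat → PySem.Set Int → List Int → List Bool → PySem.Set Int
  | 0, seen, _, _ => seen
  | fuel+1, seen, stack, done =>
    match stack with
    | [] => seen
    | m :: rest =>
      let st := (adj.getD m []).foldl (bfsInner parties) (seen, rest, done)
      solveBloop parties adj fuel st.1 st.2.1 st.2.2

def solve_alt (N : Int) (M : Int) (know : List Int) (parties : List (List Int)) : Int :=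
  let adj := buildAdj parties
  let seen := solveBloop parties adj (know.length + parties.flatten.length + 1)
      (PySem.Set.ofList know) know (parties.map (fun _ => false))
  parties.foldl
    (fun acc p => if p ≠ [] ∧ p.all (fun x => !(PySem.Set.contains seen x)) then acc + 1 else acc) 0


-- ===== PRECONDITION & SPEC =====
def Spec_solve (N : Int) (M : Int) (know : List Int) (parties : List (List Int)) (out : Int) : Prop := out = solve_alt N M know parties
instance (N : Int) (M : Int) (know : List Int) (parties : List (List Int)) (out : Int) : Decidable (Spec_solve N M know parties out) := by unfold Spec_solve; infer_instance

-- ===== CLAIM (what is proved, stated in full; the proofs are below) =====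
def Claim_equal_solve : Prop := ∀ (N : Int) (M : Int) (know : List Int) (parties : List (List Int)), Dom_solve N M know parties → Spec_solve N M know parties (solve N M know parties)

-- ===== LEMMAS AND PROOFS =====

-- members reachable from the initial knowers through chains of shared parties
inductive Reach (know : List Int) (parties : List (List Int)) : Int → Prop
  | base {m : Int} : m ∈ know → Reach know parties m
  | step {p : List Int} {m x : Int} : p ∈ parties → m ∈ p → Reach know parties m →
      x ∈ p → Reach know parties x

-- a party that never loses: nonempty and no member ever learns the truth
def GoodParty (know : List Int) (parties : List (List Int)) (p : List Int) : Prop :=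
  p ≠ [] ∧ ∀ x ∈ p, ¬ Reach know parties x

-- ---------- A side: facts about one pass and the while loop ----------

lemma passStep_know_mono (st : PySem.Set Int × List Int × Bool) (a : Int × List Int) :
    ∀ x ∈ st.1, x ∈ (passStep st a).1 := by
  intro x hx
  simp only [passStep]
  split_ifs with h1 h2
  · exact hx
  · have h : a.2.foldl PySem.Set.add st.1 = PySem.Set.update st.1 a.2 := rfl
    rw [h]; exact (PySem.Set.mem_update _ _ _).mpr (Or.inl hx)
  · exact hx

lemma pass_know_mono (L : List (Int × List Int)) (st : PySem.Set Int × List Int × Bool) :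
    ∀ x ∈ st.1, x ∈ (L.foldl passStep st).1 := by
  intro x hx
  refine List.foldlRecOn (motive := fun s => x ∈ s.1) L passStep hx ?_
  intro b hb a _
  exact passStep_know_mono b a x hb

lemma pass_flag_mono (L : List (Int × List Int)) (st : PySem.Set Int × List Int × Bool)
    (h : st.2.2 = true) : (L.foldl passStep st).2.2 = true := by
  refine List.foldlRecOn (motive := fun s => s.2.2 = true) L passStep h ?_
  intro b hb a _
  simp only [passStep]; split_ifs <;> simp [hb]

lemma pass_valid_len (L : List (Int × List Int)) (st : PySem.Set Int × List Int × Bool) :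
    (L.foldl passStep st).2.1.length = st.2.1.length := by
  refine List.foldlRecOn (motive := fun s => s.2.1.length = st.2.1.length) L passStep rfl ?_
  intro b hb a _
  simp only [passStep]; split_ifs <;> simp [PySem.List.length_pySetD, hb]

lemma pass_sound (know0 : List Int) (parties : List (List Int)) (L : List (Int × List Int))
    (hL : ∀ a ∈ L, a.2 ∈ parties) (st : PySem.Set Int × List Int × Bool)
    (hs : ∀ x ∈ st.1, Reach know0 parties x) :
    ∀ x ∈ (L.foldl passStep st).1, Reach know0 parties x := by
  refine List.foldlRecOn (motive := fun s => ∀ x ∈ s.1, Reach know0 parties x) L passStep hs ?_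
  intro b hb a ha x hx
  revert hx
  simp only [passStep]
  split_ifs with h1 h2
  · exact fun hx => hb x hx
  · intro hx
    have h : a.2.foldl PySem.Set.add b.1 = PySem.Set.update b.1 a.2 := rfl
    rw [h] at hx
    rcases (PySem.Set.mem_update _ _ _).mp hx with hx | hx
    · exact hb x hx
    · simp only [List.any_map, List.any_eq_true, Function.comp] at h2
      obtain ⟨m, hm, hc⟩ := h2
      exact Reach.step (hL a ha) hm (hb m ((PySem.Set.contains_iff _ _).mp hc)) hx
  · exact fun hx => hb x hx

lemma pass_good_one (know0 : List Int) (parties : List (List Int)) (L : List (Int × List Int))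
    (hL : ∀ a ∈ L, ∃ j, ∃ hj : j < parties.length, a.1 = (j : Int) ∧ a.2 = parties[j])
    (st : PySem.Set Int × List Int × Bool)
    (hs : ∀ x ∈ st.1, Reach know0 parties x)
    (hgood : ∀ k, ∀ hk : k < parties.length,
      GoodParty know0 parties parties[k] → st.2.1[k]? = some 1) :
    ∀ k, ∀ hk : k < parties.length,
      GoodParty know0 parties parties[k] → (L.foldl passStep st).2.1[k]? = some 1 := by
  refine List.foldlRecOn
    (motive := fun s => (∀ x ∈ s.1, Reach know0 parties x) ∧
      ∀ k, ∀ hk : k < parties.length,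
        GoodParty know0 parties parties[k] → s.2.1[k]? = some 1)
    L passStep ⟨hs, hgood⟩ ?_ |>.2
  rintro b ⟨hbs, hbg⟩ a ha
  obtain ⟨j, hj, ha1, ha2⟩ := hL a ha
  constructor
  · intro x hx; exact pass_sound know0 parties [a] (by
      intro a' ha'; simp at ha'; subst ha'; rw [ha2]; exact List.getElem_mem hj) b hbs x (by simpa using hx)
  · intro k hk hgk
    -- the slot written (if any) is j, and parties[j] is not good in the all/any branches
    by_cases hkj : k = j
    · subst hkj
      -- show the branch taken cannot be a writing branch, or derive contradiction
      revert hgk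
      simp only [passStep]
      split_ifs with h1 h2
      · intro hgk
        exfalso
        rw [← ha2] at hgk
        obtain ⟨m, hm⟩ := List.exists_mem_of_ne_nil a.2 hgk.1
        simp only [List.all_map, List.all_eq_true, Function.comp] at h1
        exact hgk.2 m hm (hbs m ((PySem.Set.contains_iff _ _).mp (h1 m hm)))
      · intro hgk
        exfalso
        simp only [List.any_map, List.any_eq_true, Function.comp] at h2
        obtain ⟨m, hm, hc⟩ := h2
        rw [ha2] at hm
        exact hgk.2 m hm (hbs m ((PySem.Set.contains_iff _ _).mp hc))
      · intro hgk; exact hbg k hk hgk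
    · -- write at a different slot (or no write): entry k unchanged
      have hb1 := hbg k hk hgk
      simp only [passStep]
      split_ifs with h1 h2
      · rw [ha1, PySem.List.pySetD_natCast]
        rw [List.getElem?_set_ne (by omega)]
        exact hb1
      · rw [ha1, PySem.List.pySetD_natCast]
        rw [List.getElem?_set_ne (by omega)]
        exact hb1
      · exact hb1

lemma pass_flag_false (L : List (Int × List Int)) (st : PySem.Set Int × List Int × Bool)
    (hst : st.2.2 = false) (hres : (L.foldl passStep st).2.2 = false) :
    (L.foldl passStep st).1 = st.1 ∧
      ∀ a ∈ L, (∀ m ∈ a.2, m ∈ st.1) ∨ (∀ m ∈ a.2, m ∉ st.1) := by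
  induction L generalizing st with
  | nil => exact ⟨rfl, by simp⟩
  | cons a T ih =>
    rw [List.foldl_cons] at hres ⊢
    -- analyze the head step
    by_cases h1 : ((a.2.map (fun m => PySem.Set.contains st.1 m)).all (fun b => b)) = true
    · have hstep : passStep st a = (st.1, PySem.List.pySetD st.2.1 a.1 0, st.2.2) := by
        simp only [passStep]; rw [if_pos h1]
      rw [hstep] at hres ⊢
      obtain ⟨hk, hrest⟩ := ih (st.1, PySem.List.pySetD st.2.1 a.1 0, st.2.2) hst hres
      refine ⟨hk, ?_⟩
      intro a' ha'
      rcases List.mem_cons.mp ha' with ha' | ha'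
      · left
        subst ha'
        simp only [List.all_map, List.all_eq_true, Function.comp] at h1
        intro m hm; exact (PySem.Set.contains_iff _ _).mp (h1 m hm)
      · exact hrest a' ha'
    · by_cases h2 : ((a.2.map (fun m => PySem.Set.contains st.1 m)).any (fun b => b)) = true
      · exfalso
        have hstep : (passStep st a).2.2 = true := by
          simp only [passStep]; rw [if_neg h1, if_pos h2]
        rw [pass_flag_mono T _ hstep] at hres; simp at hres
      · have hstep : passStep st a = st := by
          simp only [passStep]; rw [if_neg h1, if_neg h2]
        rw [hstep] at hres ⊢
        obtain ⟨hk, hrest⟩ := ih st hst hres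
        refine ⟨hk, ?_⟩
        intro a' ha'
        rcases List.mem_cons.mp ha' with ha' | ha'
        · right
          subst ha'
          intro m hm hmem
          apply h2
          simp only [List.any_map, List.any_eq_true, Function.comp]
          exact ⟨m, hm, (PySem.Set.contains_iff _ _).mpr hmem⟩
        · exact hrest a' ha'

lemma pass_flag_true_new (parties : List (List Int)) (L : List (Int × List Int))
    (hL : ∀ a ∈ L, a.2 ∈ parties) (st : PySem.Set Int × List Int × Bool)
    (hst : st.2.2 = false) (hres : (L.foldl passStep st).2.2 = true) :
    ∃ m ∈ parties.flatten, m ∉ st.1 ∧ m ∈ (L.foldl passStep st).1 := by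
  induction L generalizing st with
  | nil => rw [List.foldl_nil] at hres; rw [hst] at hres; exact absurd hres (by simp)
  | cons a T ih =>
    rw [List.foldl_cons] at hres ⊢
    by_cases h1 : ((a.2.map (fun m => PySem.Set.contains st.1 m)).all (fun b => b)) = true
    · have hstep : passStep st a = (st.1, PySem.List.pySetD st.2.1 a.1 0, st.2.2) := by
        simp only [passStep]; rw [if_pos h1]
      rw [hstep] at hres ⊢
      exact ih (fun a' ha' => hL a' (List.mem_cons_of_mem _ ha'))
        (st.1, PySem.List.pySetD st.2.1 a.1 0, st.2.2) hst hres
    · by_cases h2 : ((a.2.map (fun m => PySem.Set.contains st.1 m)).any (fun b => b)) = true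
      · -- elif branch: some member of a.2 is new
        have hstep : passStep st a
            = (a.2.foldl PySem.Set.add st.1, PySem.List.pySetD st.2.1 a.1 0, true) := by
          simp only [passStep]; rw [if_neg h1, if_pos h2]
        rw [hstep] at hres ⊢
        simp only [List.all_map, List.all_eq_true, Function.comp, not_forall] at h1
        obtain ⟨m, hm, hc⟩ := h1
        refine ⟨m, ?_, ?_, ?_⟩
        · exact List.mem_flatten.mpr ⟨a.2, hL a (List.mem_cons_self), hm⟩
        · intro hmem; exact hc ((PySem.Set.contains_iff _ _).mpr hmem)
        · apply pass_know_mono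
          have h : a.2.foldl PySem.Set.add st.1 = PySem.Set.update st.1 a.2 := rfl
          rw [h]; exact (PySem.Set.mem_update _ _ _).mpr (Or.inr hm)
      · have hstep : passStep st a = st := by
          simp only [passStep]; rw [if_neg h1, if_neg h2]
        rw [hstep] at hres ⊢
        exact ih (fun a' ha' => hL a' (List.mem_cons_of_mem _ ha')) st hst hres

lemma pass_zero_persist (L : List (Int × List Int)) (st : PySem.Set Int × List Int × Bool)
    (hL : ∀ a ∈ L, ∃ j : Nat, a.1 = (j : Int))
    (j : Nat) (h : st.2.1[j]? = some 0) : (L.foldl passStep st).2.1[j]? = some 0 := by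
  refine List.foldlRecOn (motive := fun s => s.2.1[j]? = some 0) L passStep h ?_
  intro b hb a ha
  obtain ⟨j', ha1⟩ := hL a ha
  simp only [passStep]
  split_ifs with h1 h2
  all_goals try exact hb
  all_goals {
    rw [ha1, PySem.List.pySetD_natCast]
    by_cases hjj : j = j'
    · subst hjj
      have hlt : j < b.2.1.length := by
        by_contra hge
        rw [List.getElem?_eq_none (by omega)] at hb; simp at hb
      rw [List.getElem?_set_self (by omega)]
    · rw [List.getElem?_set_ne (by omega)]; exact hb }

lemma pass_zero (know0 : List Int) (parties : List (List Int)) (L : List (Int × List Int))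
    (hL : ∀ a ∈ L, ∃ j, ∃ hj : j < parties.length, a.1 = (j : Int) ∧ a.2 = parties[j])
    (st : PySem.Set Int × List Int × Bool)
    (hexact : ∀ x, x ∈ st.1 ↔ Reach know0 parties x)
    (hlen : st.2.1.length = parties.length)
    (hst : st.2.2 = false) (hres : (L.foldl passStep st).2.2 = false) :
    ∀ a ∈ L, ∀ j, ∀ hj : j < parties.length, a.1 = (j : Int) → a.2 = parties[j] →
      ¬ GoodParty know0 parties a.2 → (L.foldl passStep st).2.1[j]? = some 0 := by
  induction L generalizing st with
  | nil => simp
  | cons a0 T ih =>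
    rw [List.foldl_cons] at hres ⊢
    -- a0's branch is never the elif one (it would force the final flag true)
    by_cases h2 : ((a0.2.map (fun m => PySem.Set.contains st.1 m)).any (fun b => b)) = true ∧
        ¬ ((a0.2.map (fun m => PySem.Set.contains st.1 m)).all (fun b => b)) = true
    · exfalso
      have hstep : (passStep st a0).2.2 = true := by
        simp only [passStep]; rw [if_neg h2.2, if_pos h2.1]
      rw [pass_flag_mono T _ hstep] at hres; simp at hres
    · have hknow : (passStep st a0).1 = st.1 := by
        simp only [passStep]; split_ifs with hh1 hh2
        · rfl
        · exact absurd ⟨hh2, hh1⟩ h2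
        · rfl
      have hflag : (passStep st a0).2.2 = st.2.2 := by
        simp only [passStep]; split_ifs with hh1 hh2
        · rfl
        · exact absurd ⟨hh2, hh1⟩ h2
        · rfl
      intro a ha j hj ha1 ha2 hbad
      rcases List.mem_cons.mp ha with ha | ha
      · -- a = a0 : this very step writes 0 at j
        subst ha
        have hall : ((a.2.map (fun m => PySem.Set.contains st.1 m)).all (fun b => b)) = true := by
          simp only [List.all_map, List.all_eq_true, Function.comp]
          intro m hm
          -- every member of a.2 is reachable (a.2 is "bad": empty is vacuous, else via step)
          apply (PySem.Set.contains_iff _ _).mpr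
          apply (hexact m).mpr
          rcases Classical.em (∃ x ∈ a.2, Reach know0 parties x) with ⟨x, hx, hrx⟩ | hno
          · exact Reach.step (ha2 ▸ List.getElem_mem hj) hx hrx hm
          · exfalso
            exact hbad ⟨by intro h0; rw [h0] at hm; simp at hm,
              fun x hx hrx => hno ⟨x, hx, hrx⟩⟩
        have hstep : passStep st a = (st.1, PySem.List.pySetD st.2.1 a.1 0, st.2.2) := by
          simp only [passStep]; rw [if_pos hall]
        rw [hstep]
        apply pass_zero_persist
        · intro a' ha'
          obtain ⟨j', hj', h1, _⟩ := hL a' (List.mem_cons_of_mem _ ha')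
          exact ⟨j', h1⟩
        · simp only [ha1, PySem.List.pySetD_natCast]
          rw [List.getElem?_set_self (by omega)]
      · -- a in the tail
        have hvlen : (passStep st a0).2.1.length = st.2.1.length := by
          simp only [passStep]; split_ifs <;> simp [PySem.List.length_pySetD]
        have := ih (fun a' ha' => hL a' (List.mem_cons_of_mem _ ha')) (passStep st a0)
          (by rw [hknow]; exact hexact) (by rw [hvlen]; exact hlen)
          (by rw [hflag]; exact hst) hres
        exact this a ha j hj ha1 ha2 hbad

lemma enum_spec (parties : List (List Int)) :
    ∀ a ∈ PySem.List.enumerate parties 0,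
      ∃ j, ∃ hj : j < parties.length, a.1 = (j : Int) ∧ a.2 = parties[j] := by
  intro a ha
  obtain ⟨k, hk, hak⟩ := (PySem.List.mem_enumerate_iff _ _ _).mp ha
  exact ⟨k, hk, by rw [hak]; simp, by rw [hak]⟩

lemma enum_mem (parties : List (List Int)) (j : Nat) (hj : j < parties.length) :
    ((j : Int), parties[j]) ∈ PySem.List.enumerate parties 0 := by
  exact (PySem.List.mem_enumerate_iff _ _ _).mpr ⟨j, hj, by simp⟩

lemma Aloop_main (know0 : List Int) (parties : List (List Int)) :
    ∀ (fuel : Nat) (know : PySem.Set Int) (valid : List Int),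
    (∀ x ∈ know, Reach know0 parties x) →
    (∀ m ∈ know0, m ∈ know) →
    valid.length = parties.length →
    (∀ k, ∀ hk : k < parties.length,
      GoodParty know0 parties parties[k] → valid[k]? = some 1) →
    (parties.flatten.toFinset \ know.toFinset).card + 2 ≤ fuel →
    (solveAloop parties fuel know valid).length = parties.length ∧
    ∀ k, ∀ hk : k < parties.length,
      (GoodParty know0 parties parties[k] →
        (solveAloop parties fuel know valid)[k]? = some 1) ∧
      (¬ GoodParty know0 parties parties[k] →
        (solveAloop parties fuel know valid)[k]? = some 0) := by
  intro fuel
  induction fuel with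
  | zero => intro know valid _ _ _ _ hf; omega
  | succ f ih =>
    intro know valid hsound hk0 hlen hgood hf
    have hE1 : ∀ a ∈ PySem.List.enumerate parties 0, a.2 ∈ parties := by
      intro a ha
      obtain ⟨j, hj, _, h2⟩ := enum_spec parties a ha
      rw [h2]; exact List.getElem_mem hj
    set st := solveApass parties know valid with hst
    have hsound' : ∀ x ∈ st.1, Reach know0 parties x :=
      pass_sound know0 parties _ hE1 (know, valid, false) hsound
    have hlen' : st.2.1.length = parties.length := by
      rw [hst]; unfold solveApass
      rw [pass_valid_len]; exact hlen
    have hgood' : ∀ k, ∀ hk : k < parties.length,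
        GoodParty know0 parties parties[k] → st.2.1[k]? = some 1 :=
      pass_good_one know0 parties _ (enum_spec parties) (know, valid, false) hsound hgood
    have hunf : solveAloop parties (f+1) know valid
        = if st.2.2 then solveAloop parties f st.1 st.2.1 else st.2.1 := rfl
    rw [hunf]
    by_cases hflag : st.2.2 = true
    · rw [if_pos hflag]
      -- a flagged pass strictly enlarges know within flatten
      obtain ⟨m, hmflat, hmnot, hmin⟩ :=
        pass_flag_true_new parties _ hE1 (know, valid, false) rfl hflag
      have hmono : ∀ x ∈ know, x ∈ st.1 := pass_know_mono _ (know, valid, false)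
      have hcard : (parties.flatten.toFinset \ st.1.toFinset).card
          < (parties.flatten.toFinset \ know.toFinset).card := by
        apply Finset.card_lt_card
        constructor
        · intro y hy
          simp only [Finset.mem_sdiff, List.mem_toFinset] at hy ⊢
          exact ⟨hy.1, fun hc => hy.2 (hmono y hc)⟩
        · intro hsub
          have : m ∈ parties.flatten.toFinset \ know.toFinset := by
            simp only [Finset.mem_sdiff, List.mem_toFinset]; exact ⟨hmflat, hmnot⟩
          have := hsub this
          simp only [Finset.mem_sdiff, List.mem_toFinset] at this
          exact this.2 hmin
      exact ih st.1 st.2.1 hsound' (fun x hx => hmono x (hk0 x hx)) hlen' hgood' (by omega)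
    · rw [if_neg hflag]
      rw [Bool.not_eq_true] at hflag
      -- final pass: know is a fixpoint, hence exactly the reachable set
      obtain ⟨hkeq, hparts⟩ := pass_flag_false _ (know, valid, false) rfl hflag
      have hexact : ∀ x, x ∈ know ↔ Reach know0 parties x := by
        intro x
        constructor
        · exact hsound x
        · intro hr
          induction hr with
          | base hm => exact hk0 _ hm
          | step hp hm _ hx ihr =>
            rename_i p m y _
            obtain ⟨j, hj, hpj⟩ := List.getElem_of_mem hp
            rcases hparts ((j : Int), p) (hpj ▸ enum_mem parties j hj) with hall | hnone
            · exact hall y hx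
            · exact absurd ihr (hnone m hm)
      refine ⟨hlen', ?_⟩
      intro k hk
      constructor
      · exact fun hg => hgood' k hk hg
      · intro hbad
        exact pass_zero know0 parties _ (enum_spec parties) (know, valid, false)
          hexact hlen rfl hflag ((k : Int), parties[k]) (enum_mem parties k hk) k hk rfl rfl hbad

-- ---------- B side: the adjacency index and the BFS worklist ----------

lemma adj_fold_mem (L : List (Int × List Int)) (d : PySem.Dict Int (List Int)) (c i : Int) :
    i ∈ (L.foldl (fun d ip => ip.2.foldl (fun d2 m => d2.modify m [] (fun l => l ++ [ip.1])) d) d).getD c []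
      ↔ i ∈ d.getD c [] ∨ ∃ ip ∈ L, c ∈ ip.2 ∧ i = ip.1 := by
  induction L generalizing d with
  | nil => simp
  | cons a T ih =>
    rw [List.foldl_cons]
    rw [ih]
    have hinner : a.2.foldl (fun d2 m => d2.modify m [] (fun l => l ++ [a.1])) d
        = (a.2.map (fun m => (m, a.1))).foldl (fun d q => d.modify q.1 [] (fun l => l ++ [q.2])) d := by
      rw [List.foldl_map]
    have hget := PySem.Dict.getD_foldl_modify_append (a.2.map (fun m => (m, a.1))) d c
    rw [hinner, hget]
    simp only [List.mem_append, List.mem_map, List.mem_filter, List.mem_cons, beq_iff_eq]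
    constructor
    · intro h
      rcases h with h | h
      · rcases h with h | h
        · exact Or.inl h
        · obtain ⟨q, hq1, hq2⟩ := h
          obtain ⟨hq3, hq4⟩ := hq1
          obtain ⟨m, hm, hmq⟩ := hq3
          refine Or.inr ⟨a, Or.inl rfl, ?_, ?_⟩
          · rw [← hmq] at hq4; simp only at hq4; rw [← hq4]; exact hm
          · rw [← hq2, ← hmq]
      · obtain ⟨ip, hip, h1, h2⟩ := h
        exact Or.inr ⟨ip, Or.inr hip, h1, h2⟩
    · intro h
      rcases h with h | h
      · exact Or.inl (Or.inl h)
      · obtain ⟨ip, hip, h1, h2⟩ := h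
        rcases hip with hip | hip
        · subst hip
          refine Or.inl (Or.inr ⟨(c, ip.1), ⟨⟨c, h1, rfl⟩, rfl⟩, h2.symm⟩)
        · exact Or.inr ⟨ip, hip, h1, h2⟩

lemma adj_mem (parties : List (List Int)) (c i : Int) :
    i ∈ (buildAdj parties).getD c [] ↔
      ∃ k, ∃ hk : k < parties.length, c ∈ parties[k] ∧ i = (k : Int) := by
  unfold buildAdj
  rw [adj_fold_mem]
  constructor
  · rintro (h | ⟨ip, hip, h1, h2⟩)
    · exfalso
      have : (PySem.Dict.empty : PySem.Dict Int (List Int)).getD c [] = [] := rfl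
      rw [this] at h; simp at h
    · obtain ⟨k, hk, hik⟩ := (PySem.List.mem_enumerate_iff _ _ _).mp hip
      refine ⟨k, hk, ?_, ?_⟩
      · rw [hik] at h1; exact h1
      · rw [hik] at h2; simpa using h2
  · rintro ⟨k, hk, h1, h2⟩
    refine Or.inr ⟨((k : Int), parties[k]), (PySem.List.mem_enumerate_iff _ _ _).mpr ⟨k, hk, by simp⟩, h1, by simpa using h2⟩

def istep (st2 : PySem.Set Int × List Int) (x : Int) : PySem.Set Int × List Int :=
  if PySem.Set.contains st2.1 x then st2 else (PySem.Set.add st2.1 x, x :: st2.2)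

lemma istep_mono (st : PySem.Set Int × List Int) (x : Int) :
    (∀ y ∈ st.1, y ∈ (istep st x).1) ∧ (∀ y ∈ st.2, y ∈ (istep st x).2) := by
  unfold istep
  split_ifs with h
  · exact ⟨fun y hy => hy, fun y hy => hy⟩
  · constructor
    · intro y hy; exact (PySem.Set.mem_add _ _ _).mpr (Or.inl hy)
    · intro y hy; exact List.mem_cons_of_mem _ hy

lemma ifold_mono (l : List Int) (st : PySem.Set Int × List Int) :
    (∀ y ∈ st.1, y ∈ (l.foldl istep st).1) ∧ (∀ y ∈ st.2, y ∈ (l.foldl istep st).2) := by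
  refine List.foldlRecOn
    (motive := fun s => (∀ y ∈ st.1, y ∈ s.1) ∧ (∀ y ∈ st.2, y ∈ s.2))
    l istep ⟨fun _ h => h, fun _ h => h⟩ ?_
  rintro b ⟨h1, h2⟩ x _
  exact ⟨fun y hy => (istep_mono b x).1 y (h1 y hy), fun y hy => (istep_mono b x).2 y (h2 y hy)⟩

lemma ifold_all (l : List Int) (st : PySem.Set Int × List Int) :
    ∀ x ∈ l, x ∈ (l.foldl istep st).1 := by
  induction l generalizing st with
  | nil => simp
  | cons a T ih =>
    intro x hx
    rw [List.foldl_cons]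
    rcases List.mem_cons.mp hx with rfl | hx
    · apply (ifold_mono T (istep st x)).1
      unfold istep
      split_ifs with h
      · exact (PySem.Set.contains_iff _ _).mp h
      · exact (PySem.Set.mem_add _ _ _).mpr (Or.inr rfl)
    · exact ih (istep st a) x hx

lemma ifold_seen_src (l : List Int) (st : PySem.Set Int × List Int) :
    ∀ x ∈ (l.foldl istep st).1, x ∈ st.1 ∨ x ∈ l := by
  refine List.foldlRecOn (motive := fun s => ∀ x ∈ s.1, x ∈ st.1 ∨ x ∈ l) l istep
    (fun x hx => Or.inl hx) ?_
  intro b hb x hx y hy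
  revert hy; unfold istep
  split_ifs with h
  · exact hb y
  · intro hy
    rcases (PySem.Set.mem_add _ _ _).mp hy with hy | rfl
    · exact hb y hy
    · exact Or.inr hx

lemma ifold_new_in_stack (l : List Int) (st : PySem.Set Int × List Int) :
    ∀ x ∈ (l.foldl istep st).1, x ∈ st.1 ∨ x ∈ (l.foldl istep st).2 := by
  induction l generalizing st with
  | nil => exact fun x hx => Or.inl hx
  | cons a T ih =>
    rw [List.foldl_cons]
    intro x hx
    rcases ih (istep st a) x hx with hx1 | hx2
    · -- x in seen after first step
      revert hx1; unfold istep
      split_ifs with h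
      · exact fun hx1 => Or.inl hx1
      · intro hx1
        rcases (PySem.Set.mem_add _ _ _).mp hx1 with hy | rfl
        · exact Or.inl hy
        · -- x was pushed by the first step: x ∈ stack after step, stays by mono
          right
          apply (ifold_mono T _).2
          exact List.mem_cons_self
    · exact Or.inr hx2

lemma ifold_stack_seen (l : List Int) (st : PySem.Set Int × List Int)
    (h : ∀ y ∈ st.2, y ∈ st.1) : ∀ y ∈ (l.foldl istep st).2, y ∈ (l.foldl istep st).1 := by
  induction l generalizing st with
  | nil => exact h
  | cons a T ih =>
    rw [List.foldl_cons]
    apply ih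
    unfold istep
    split_ifs with hc
    · exact h
    · intro y hy
      rcases List.mem_cons.mp hy with rfl | hy
      · exact (PySem.Set.mem_add _ _ _).mpr (Or.inr rfl)
      · exact (PySem.Set.mem_add _ _ _).mpr (Or.inl (h y hy))

lemma ifold_measure (U : List Int) (l : List Int) (st : PySem.Set Int × List Int)
    (hl : ∀ x ∈ l, x ∈ U) :
    (l.foldl istep st).2.length + (U.toFinset \ (l.foldl istep st).1.toFinset).card
      ≤ st.2.length + (U.toFinset \ st.1.toFinset).card := by
  induction l generalizing st with
  | nil => exact le_refl _
  | cons a T ih =>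
    rw [List.foldl_cons]
    refine le_trans (ih (istep st a) (fun x hx => hl x (List.mem_cons_of_mem _ hx))) ?_
    unfold istep
    split_ifs with hc
    · exact le_refl _
    · have ha : a ∉ st.1 := fun hmem => hc ((PySem.Set.contains_iff _ _).mpr hmem)
      have hadd : PySem.Set.add st.1 a = st.1 ++ [a] := PySem.Set.add_of_not_mem ha
      have hfin : (PySem.Set.add st.1 a).toFinset = insert a st.1.toFinset := by
        rw [hadd]; ext y; simp [or_comm]
      simp only [hfin, List.length_cons]
      have haU : a ∈ U.toFinset \ st.1.toFinset := by
        simp only [Finset.mem_sdiff, List.mem_toFinset]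
        exact ⟨hl a List.mem_cons_self, ha⟩
      rw [Finset.sdiff_insert]
      rw [Finset.card_erase_of_mem haU]
      have h1 : 0 < (U.toFinset \ st.1.toFinset).card := Finset.card_pos.mpr ⟨a, haU⟩
      omega


lemma bfsInner_istep (parties : List (List Int)) (st : PySem.Set Int × List Int × List Bool)
    (i : Int) (h : PySem.List.pyGetD st.2.2 i false = false) :
    bfsInner parties st i =
      (((PySem.List.pyGetD parties i []).foldl istep (st.1, st.2.1)).1,
       ((PySem.List.pyGetD parties i []).foldl istep (st.1, st.2.1)).2,
       PySem.List.pySetD st.2.2 i true) := by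
  unfold bfsInner
  rw [if_neg (by simp [h])]; rfl

-- done entries that are true stay true (placeholder)
lemma setD_true_keep (xs : List Bool) (i : Int) (k : Nat) (h : xs[k]? = some true) :
    (PySem.List.pySetD xs i true)[k]? = some true := by
  rcases hs : PySem.List.pySet? xs i true with _ | ys
  · unfold PySem.List.pySetD; rw [hs]; exact h
  · unfold PySem.List.pySetD; rw [hs]
    simp only [Option.getD_some]
    unfold PySem.List.pySet? at hs
    rcases hmap : PySem.List.pyIdx? xs.length i with _ | t
    · rw [hmap] at hs; simp at hs
    · rw [hmap] at hs
      simp only [Option.map_some, Option.some.injEq] at hs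
      subst hs
      by_cases hk : t = k
      · subst hk
        by_cases ht2 : t < xs.length
        · rw [List.getElem?_set_self ht2]
        · rw [List.set_eq_of_length_le (by omega)]; exact h
      · rw [List.getElem?_set_ne (by omega)]; exact h

lemma bfsInner_dtrue (parties : List (List Int)) (st : PySem.Set Int × List Int × List Bool)
    (i : Int) (k : Nat) (h : st.2.2[k]? = some true) :
    (bfsInner parties st i).2.2[k]? = some true := by
  unfold bfsInner
  split_ifs with hd
  · exact h
  · exact setD_true_keep _ _ _ h

lemma pyGetD_idx {α : Type} (xs : List α) (k : Nat) (d : α) (hk : k < xs.length) :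
    PySem.List.pyGetD xs (k : Int) d = xs[k] := by
  rw [PySem.List.pyGetD_natCast, List.getD_eq_getElem?_getD, List.getElem?_eq_getElem hk]
  simp

lemma ofold_mono3 (parties : List (List Int)) (l : List Int)
    (st : PySem.Set Int × List Int × List Bool) :
    (∀ y ∈ st.1, y ∈ (l.foldl (bfsInner parties) st).1) ∧
    (∀ y ∈ st.2.1, y ∈ (l.foldl (bfsInner parties) st).2.1) := by
  refine List.foldlRecOn
    (motive := fun s => (∀ y ∈ st.1, y ∈ s.1) ∧ (∀ y ∈ st.2.1, y ∈ s.2.1))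
    l (bfsInner parties) ⟨fun _ h => h, fun _ h => h⟩ ?_
  rintro b ⟨h1, h2⟩ i _
  by_cases hd : PySem.List.pyGetD b.2.2 i false
  · unfold bfsInner; rw [if_pos hd]; exact ⟨h1, h2⟩
  · rw [bfsInner_istep parties b i (by simpa using hd)]
    exact ⟨fun y hy => (ifold_mono _ (b.1, b.2.1)).1 y (h1 y hy),
           fun y hy => (ifold_mono _ (b.1, b.2.1)).2 y (h2 y hy)⟩

lemma ofold_dtrue (parties : List (List Int)) (l : List Int)
    (st : PySem.Set Int × List Int × List Bool) (k : Nat) (h : st.2.2[k]? = some true) :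
    (l.foldl (bfsInner parties) st).2.2[k]? = some true := by
  refine List.foldlRecOn (motive := fun s => s.2.2[k]? = some true) l (bfsInner parties) h ?_
  intro b hb i _
  exact bfsInner_dtrue parties b i k hb

lemma ofold_dlen (parties : List (List Int)) (l : List Int)
    (st : PySem.Set Int × List Int × List Bool) :
    (l.foldl (bfsInner parties) st).2.2.length = st.2.2.length := by
  refine List.foldlRecOn (motive := fun s => s.2.2.length = st.2.2.length)
    l (bfsInner parties) rfl ?_
  intro b hb i _
  by_cases hd : PySem.List.pyGetD b.2.2 i false
  · unfold bfsInner; rw [if_pos hd]; exact hb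
  · rw [bfsInner_istep parties b i (by simpa using hd)]
    simp only [PySem.List.length_pySetD]
    exact hb

lemma ofold_done_all (parties : List (List Int)) (l : List Int)
    (st : PySem.Set Int × List Int × List Bool)
    (hdlen : st.2.2.length = parties.length) :
    ∀ i ∈ l, ∀ k, ∀ hk : k < parties.length, i = (k : Int) →
      (l.foldl (bfsInner parties) st).2.2[k]? = some true := by
  induction l generalizing st with
  | nil => simp
  | cons a T ih =>
    intro i hi k hk hik
    rw [List.foldl_cons]
    rcases List.mem_cons.mp hi with rfl | hi
    · subst hik
      by_cases hd : PySem.List.pyGetD st.2.2 (k : Int) false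
      · apply ofold_dtrue
        unfold bfsInner; rw [if_pos hd]
        rw [pyGetD_idx st.2.2 k false (by omega)] at hd
        rw [List.getElem?_eq_getElem (by omega)]
        simpa using hd
      · apply ofold_dtrue
        rw [bfsInner_istep parties st _ (by simpa using hd)]
        simp only
        rw [PySem.List.pySetD_natCast]
        rw [List.getElem?_set_self (by omega)]
    · refine ih (bfsInner parties st a) ?_ i hi k hk hik
      by_cases hd : PySem.List.pyGetD st.2.2 a false
      · unfold bfsInner; rw [if_pos hd]; exact hdlen
      · rw [bfsInner_istep parties st a (by simpa using hd)]
        simp only [PySem.List.length_pySetD]; exact hdlen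

lemma ofold_idone (parties : List (List Int)) (l : List Int)
    (hl : ∀ i ∈ l, ∃ k, ∃ hk : k < parties.length, i = (k : Int))
    (st : PySem.Set Int × List Int × List Bool)
    (hdlen : st.2.2.length = parties.length)
    (hI : ∀ k, ∀ hk : k < parties.length, st.2.2[k]? = some true →
      ∀ x ∈ parties[k], x ∈ st.1) :
    ∀ k, ∀ hk : k < parties.length, (l.foldl (bfsInner parties) st).2.2[k]? = some true →
      ∀ x ∈ parties[k], x ∈ (l.foldl (bfsInner parties) st).1 := by
  refine List.foldlRecOn
    (motive := fun s => s.2.2.length = parties.length ∧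
      ∀ k, ∀ hk : k < parties.length, s.2.2[k]? = some true → ∀ x ∈ parties[k], x ∈ s.1)
    l (bfsInner parties) ⟨hdlen, hI⟩ ?_ |>.2
  rintro b ⟨hbl, hbI⟩ i hi
  obtain ⟨k0, hk0, rfl⟩ := hl i hi
  by_cases hd : PySem.List.pyGetD b.2.2 (k0 : Int) false
  · unfold bfsInner; rw [if_pos hd]; exact ⟨hbl, hbI⟩
  · rw [bfsInner_istep parties b _ (by simpa using hd)]
    refine ⟨by simp [PySem.List.length_pySetD, hbl], ?_⟩
    intro k hk htrue x hx
    simp only [PySem.List.pySetD_natCast] at htrue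
    by_cases hkk : k = k0
    · subst hkk
      apply ifold_all
      rw [pyGetD_idx parties k [] hk]
      exact hx
    · rw [List.getElem?_set_ne (by omega)] at htrue
      exact (ifold_mono _ (b.1, b.2.1)).1 x (hbI k hk htrue x hx)

lemma ofold_sound3 (know0 : List Int) (parties : List (List Int)) (m : Int)
    (hrm : Reach know0 parties m) (l : List Int)
    (hl : ∀ i ∈ l, ∃ k, ∃ hk : k < parties.length, m ∈ parties[k] ∧ i = (k : Int))
    (st : PySem.Set Int × List Int × List Bool)
    (hs : ∀ y ∈ st.1, Reach know0 parties y) :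
    ∀ y ∈ (l.foldl (bfsInner parties) st).1, Reach know0 parties y := by
  refine List.foldlRecOn (motive := fun s => ∀ y ∈ s.1, Reach know0 parties y)
    l (bfsInner parties) hs ?_
  intro b hb i hi y hy
  by_cases hd : PySem.List.pyGetD b.2.2 i false
  · unfold bfsInner at hy; rw [if_pos hd] at hy; exact hb y hy
  · rw [bfsInner_istep parties b i (by simpa using hd)] at hy
    simp only at hy
    rcases ifold_seen_src _ (b.1, b.2.1) y hy with hy | hy
    · exact hb y hy
    · obtain ⟨k, hk, hmk, rfl⟩ := hl i hi
      rw [pyGetD_idx parties k [] hk] at hy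
      exact Reach.step (List.getElem_mem hk) hmk hrm hy

lemma ofold_new_in_stack3 (parties : List (List Int)) (l : List Int)
    (st : PySem.Set Int × List Int × List Bool) :
    ∀ y ∈ (l.foldl (bfsInner parties) st).1,
      y ∈ st.1 ∨ y ∈ (l.foldl (bfsInner parties) st).2.1 := by
  induction l generalizing st with
  | nil => exact fun y hy => Or.inl hy
  | cons a T ih =>
    rw [List.foldl_cons]
    intro y hy
    rcases ih (bfsInner parties st a) y hy with hy1 | hy2
    · by_cases hd : PySem.List.pyGetD st.2.2 a false
      · unfold bfsInner at hy1; rw [if_pos hd] at hy1; exact Or.inl hy1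
      · rw [bfsInner_istep parties st a (by simpa using hd)] at hy1
        simp only at hy1
        rcases ifold_new_in_stack _ (st.1, st.2.1) y hy1 with h | h
        · exact Or.inl h
        · right
          apply (ofold_mono3 parties T _).2
          rw [bfsInner_istep parties st a (by simpa using hd)]
          exact h
    · exact Or.inr hy2

lemma ofold_stack_seen3 (parties : List (List Int)) (l : List Int)
    (st : PySem.Set Int × List Int × List Bool) (h : ∀ y ∈ st.2.1, y ∈ st.1) :
    ∀ y ∈ (l.foldl (bfsInner parties) st).2.1, y ∈ (l.foldl (bfsInner parties) st).1 := by
  induction l generalizing st with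
  | nil => exact h
  | cons a T ih =>
    rw [List.foldl_cons]
    apply ih
    by_cases hd : PySem.List.pyGetD st.2.2 a false
    · unfold bfsInner; rw [if_pos hd]; exact h
    · rw [bfsInner_istep parties st a (by simpa using hd)]
      exact ifold_stack_seen _ (st.1, st.2.1) h

lemma ofold_measure3 (parties : List (List Int)) (l : List Int)
    (hl : ∀ i ∈ l, ∃ k, ∃ hk : k < parties.length, i = (k : Int))
    (st : PySem.Set Int × List Int × List Bool) :
    (l.foldl (bfsInner parties) st).2.1.length
        + (parties.flatten.toFinset \ (l.foldl (bfsInner parties) st).1.toFinset).card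
      ≤ st.2.1.length + (parties.flatten.toFinset \ st.1.toFinset).card := by
  induction l generalizing st with
  | nil => exact le_refl _
  | cons a T ih =>
    rw [List.foldl_cons]
    refine le_trans (ih (fun i hi => hl i (List.mem_cons_of_mem _ hi)) _) ?_
    by_cases hd : PySem.List.pyGetD st.2.2 a false
    · unfold bfsInner; rw [if_pos hd]
    · rw [bfsInner_istep parties st a (by simpa using hd)]
      obtain ⟨k, hk, rfl⟩ := hl a List.mem_cons_self
      have := ifold_measure parties.flatten (PySem.List.pyGetD parties (k : Int) [])
        (st.1, st.2.1) (by
          intro x hx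
          rw [pyGetD_idx parties k [] hk] at hx
          exact List.mem_flatten.mpr ⟨parties[k], List.getElem_mem hk, hx⟩)
      simpa using this

lemma Bloop_main (know0 : List Int) (parties : List (List Int)) :
    ∀ (fuel : Nat) (seen : PySem.Set Int) (stack : List Int) (done : List Bool),
    (∀ m ∈ know0, m ∈ seen) →
    (∀ x ∈ seen, Reach know0 parties x) →
    (∀ y ∈ stack, y ∈ seen) →
    done.length = parties.length →
    (∀ k, ∀ hk : k < parties.length, done[k]? = some true → ∀ x ∈ parties[k], x ∈ seen) →
    (∀ m ∈ seen, m ∈ stack ∨ ∀ k, ∀ hk : k < parties.length,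
        m ∈ parties[k] → done[k]? = some true) →
    stack.length + (parties.flatten.toFinset \ seen.toFinset).card ≤ fuel →
    ∀ x, x ∈ solveBloop parties (buildAdj parties) fuel seen stack done ↔ Reach know0 parties x := by
  intro fuel
  induction fuel with
  | zero =>
    intro seen stack done h0 hs hstk hdlen hidone hproc hf x
    have hempty : stack = [] := by
      cases stack with
      | nil => rfl
      | cons a t => simp [List.length_cons] at hf
    subst hempty
    show x ∈ seen ↔ _
    constructor
    · exact hs x
    · intro hr
      induction hr with
      | base hm => exact h0 _ hm
      | step hp hm _ hx ihr =>
        rename_i p2 m2 y2 _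
        obtain ⟨j, hj, hpj⟩ := List.getElem_of_mem hp
        rcases hproc m2 ihr with hin | hcl
        · simp at hin
        · exact hidone j hj (hcl j hj (hpj ▸ hm)) y2 (hpj ▸ hx)
  | succ f ih =>
    intro seen stack done h0 hs hstk hdlen hidone hproc hf x
    cases stack with
    | nil =>
      show x ∈ seen ↔ _
      constructor
      · exact hs x
      · intro hr
        induction hr with
        | base hm => exact h0 _ hm
        | step hp hm _ hx ihr =>
          rename_i p2 m2 y2 _
          obtain ⟨j, hj, hpj⟩ := List.getElem_of_mem hp
          rcases hproc m2 ihr with hin | hcl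
          · simp at hin
          · exact hidone j hj (hcl j hj (hpj ▸ hm)) y2 (hpj ▸ hx)
    | cons m rest =>
      show x ∈ solveBloop parties (buildAdj parties) f
        ((((buildAdj parties).getD m []).foldl (bfsInner parties) (seen, rest, done)).1)
        ((((buildAdj parties).getD m []).foldl (bfsInner parties) (seen, rest, done)).2.1)
        ((((buildAdj parties).getD m []).foldl (bfsInner parties) (seen, rest, done)).2.2) ↔ _
      set adjl := (buildAdj parties).getD m [] with hadjl
      set ST := adjl.foldl (bfsInner parties) (seen, rest, done) with hST
      have hadj : ∀ i ∈ adjl, ∃ k, ∃ hk : k < parties.length, m ∈ parties[k] ∧ i = (k : Int) := by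
        intro i hi; exact (adj_mem parties m i).mp hi
      have hadj' : ∀ i ∈ adjl, ∃ k, ∃ hk : k < parties.length, i = (k : Int) := by
        intro i hi; obtain ⟨k, hk, _, h2⟩ := hadj i hi; exact ⟨k, hk, h2⟩
      have hmseen : m ∈ seen := hstk m List.mem_cons_self
      have hrm : Reach know0 parties m := hs m hmseen
      have hmono := ofold_mono3 parties adjl (seen, rest, done)
      apply ih ST.1 ST.2.1 ST.2.2
      · exact fun y hy => hmono.1 y (h0 y hy)
      · exact ofold_sound3 know0 parties m hrm adjl hadj (seen, rest, done) hs
      · exact ofold_stack_seen3 parties adjl (seen, rest, done)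
          (fun y hy => hstk y (List.mem_cons_of_mem _ hy))
      · rw [hST]; rw [ofold_dlen]; exact hdlen
      · exact ofold_idone parties adjl hadj' (seen, rest, done) hdlen hidone
      · -- processed invariant
        intro y hy
        rcases ofold_new_in_stack3 parties adjl (seen, rest, done) y hy with hyseen | hystk
        · rcases hproc y hyseen with hyin | hycl
          · rcases List.mem_cons.mp hyin with rfl | hyin
            · right
              intro k hk hmk
              have hik : (k : Int) ∈ adjl := (adj_mem parties y (k : Int)).mpr ⟨k, hk, hmk, rfl⟩
              exact ofold_done_all parties adjl (seen, rest, done) hdlen (k : Int) hik k hk rfl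
            · exact Or.inl (hmono.2 y hyin)
          · right
            intro k hk hmk
            exact ofold_dtrue parties adjl (seen, rest, done) k (hycl k hk hmk)
        · exact Or.inl hystk
      · -- fuel
        have hmeas := ofold_measure3 parties adjl hadj' (seen, rest, done)
        rw [← hST] at hmeas
        have hmeas' : ST.2.1.length + (parties.flatten.toFinset \ ST.1.toFinset).card
            ≤ rest.length + (parties.flatten.toFinset \ seen.toFinset).card := by
          simpa using hmeas
        simp only [List.length_cons] at hf
        omega

lemma bcount (seen : PySem.Set Int) :
    ∀ (l : List (List Int)) (acc : Int),
    List.foldl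
      (fun acc p => if p ≠ [] ∧ p.all (fun x => !(PySem.Set.contains seen x)) then acc + 1 else acc)
      acc l
      = acc + ((l.countP (fun p => decide (p ≠ []) && p.all (fun x => !(PySem.Set.contains seen x)))) : Int) := by
  intro l
  induction l with
  | nil => intro acc; simp
  | cons q t iht =>
    intro acc
    rw [List.foldl_cons, List.countP_cons]
    by_cases hq : q ≠ [] ∧ (q.all (fun x => !(PySem.Set.contains seen x))) = true
    · rw [if_pos hq, iht]
      have : (decide (q ≠ []) && q.all (fun x => !(PySem.Set.contains seen x))) = true := by
        simp only [Bool.and_eq_true, decide_eq_true_eq]; exact hq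
      rw [this]
      simp only [if_true]
      push_cast
      ring
    · rw [if_neg hq, iht]
      have : (decide (q ≠ []) && q.all (fun x => !(PySem.Set.contains seen x))) = false := by
        rw [← Bool.not_eq_true]
        simp only [Bool.and_eq_true, decide_eq_true_eq]
        exact hq
      rw [this]
      simp

-- ---------- glue ----------

theorem solve_spec : Claim_equal_solve := by
  unfold Claim_equal_solve
  intro N M know parties _
  unfold Spec_solve
  unfold solve solve_alt
  set seenF := solveBloop parties (buildAdj parties)
      (know.length + parties.flatten.length + 1) (PySem.Set.ofList know) know
      (parties.map (fun _ => false)) with hseenF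
  have hcard0 : (parties.flatten.toFinset \ (PySem.Set.ofList know).toFinset).card
      ≤ parties.flatten.length :=
    le_trans (Finset.card_le_card (Finset.sdiff_subset)) (List.toFinset_card_le _)
  have hseen : ∀ x, x ∈ seenF ↔ Reach know parties x := by
    apply Bloop_main know parties _ (PySem.Set.ofList know) know (parties.map (fun _ => false))
    · exact fun m hm => (PySem.Set.mem_ofList _ _).mpr hm
    · exact fun x hx => Reach.base ((PySem.Set.mem_ofList _ _).mp hx)
    · exact fun y hy => (PySem.Set.mem_ofList _ _).mpr hy
    · simp
    · intro k hk htrue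
      rw [List.getElem?_map, List.getElem?_eq_getElem hk] at htrue
      simp at htrue
    · exact fun m hm => Or.inl ((PySem.Set.mem_ofList _ _).mp hm)
    · omega
  have hA := Aloop_main know parties (parties.flatten.length + 2) (PySem.Set.ofList know)
    (parties.map (fun _ => (1 : Int)))
    (fun x hx => Reach.base ((PySem.Set.mem_ofList _ _).mp hx))
    (fun m hm => (PySem.Set.mem_ofList _ _).mpr hm)
    (by simp)
    (by
      intro k hk _
      rw [List.getElem?_eq_getElem (by simpa using hk)]
      simp)
    (by omega)
  set validF := solveAloop parties (parties.flatten.length + 2) (PySem.Set.ofList know)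
    (parties.map (fun _ => (1 : Int))) with hvalidF
  set Pb : List Int → Bool :=
    fun p => decide (p ≠ []) && p.all (fun x => !(PySem.Set.contains seenF x)) with hPbdef
  have hPb : ∀ p, Pb p = true ↔ GoodParty know parties p := by
    intro p
    rw [hPbdef]
    simp only [Bool.and_eq_true, decide_eq_true_eq, List.all_eq_true, Bool.not_eq_eq_eq_not,
      Bool.not_true, GoodParty]
    refine and_congr_right (fun _ => ?_)
    refine forall₂_congr (fun x hx => ?_)
    constructor
    · intro hfalse hr
      have : PySem.Set.contains seenF x = true :=
        (PySem.Set.contains_iff _ _).mpr ((hseen x).mpr hr)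
      rw [hfalse] at this
      exact Bool.false_ne_true this
    · intro hnr
      have hx2 : x ∉ seenF := fun hm => hnr ((hseen x).mp hm)
      have : ¬ (PySem.Set.contains seenF x = true) :=
        fun hc => hx2 ((PySem.Set.contains_iff _ _).mp hc)
      simpa using this
  have hvalid : validF = parties.map (fun p => if Pb p = true then (1 : Int) else 0) := by
    apply List.ext_getElem?
    intro k
    by_cases hk : k < parties.length
    · rw [List.getElem?_map, List.getElem?_eq_getElem hk]
      simp only [Option.map_some]
      by_cases hg : GoodParty know parties parties[k]
      · rw [(hA.2 k hk).1 hg, if_pos ((hPb _).mpr hg)]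
      · rw [(hA.2 k hk).2 hg, if_neg (fun hc => hg ((hPb _).mp hc))]
    · rw [List.getElem?_eq_none (by omega), List.getElem?_eq_none (by simp; omega)]
  rw [hvalid, PySem.List.sum_map_ite_one_zero Pb parties]
  rw [hPbdef, bcount seenF parties 0]
  simp
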